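-- pv_equiv track=rewrite | github.com/NordicTechnologySchool/Python-PolarWeatherApps | City_Weather.py | get_api_address
-- ===== SOURCE A (Python) =====
-- def get_api_address(cities=None):
--     if cities==None:
--         cities=(
--             'bekasi','jakarta','depok','bogor','tangerang','bandung','cirebon','banten','yogyakarta','kebumen','palembang','medan','aceh','padang','pekanbaru','denpasar','makassar','palu','banjarmasin','jayapura'
--         )
--     else:
--         cities==cities
--     api_address={
--         'bekasi'     :'http://api.openweathermap.org/data/2.5/weather?q=Bekasi,id&appid=2c79812cb5b96da223e2040a7ce36d45',
--         'jakarta'    :'http://api.openweathermap.org/data/2.5/weather?q=Jakarta,id&appid=2c79812cb5b96da223e2040a7ce36d45',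
--         'depok'      :'http://api.openweathermap.org/data/2.5/weather?q=Depok,id&appid=2c79812cb5b96da223e2040a7ce36d45',
--         'bogor'      :'http://api.openweathermap.org/data/2.5/weather?q=Bogor,id&appid=2c79812cb5b96da223e2040a7ce36d45',
--         'tangerang'  :'http://api.openweathermap.org/data/2.5/weather?q=Tangerang,id&appid=2c79812cb5b96da223e2040a7ce36d45',
--         'bandung'    :'http://api.openweathermap.org/data/2.5/weather?q=Bandung,id&appid=2c79812cb5b96da223e2040a7ce36d45',
--         'cirebon'    :'http://api.openweathermap.org/data/2.5/weather?q=Cirebon,id&appid=2c79812cb5b96da223e2040a7ce36d45',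
--         'banten'     :'http://api.openweathermap.org/data/2.5/weather?q=Banten,id&appid=2c79812cb5b96da223e2040a7ce36d45',
--         'yogyakarta' :'http://api.openweathermap.org/data/2.5/weather?q=Yogyakarta,id&appid=2c79812cb5b96da223e2040a7ce36d45',
--         'kebumen'    :'http://api.openweathermap.org/data/2.5/weather?q=Kebumen,id&appid=2c79812cb5b96da223e2040a7ce36d45',
--         'palembang'  :'http://api.openweathermap.org/data/2.5/weather?q=Palembang,id&appid=2c79812cb5b96da223e2040a7ce36d45',
--         'medan'      :'http://api.openweathermap.org/data/2.5/weather?q=Medan,id&appid=2c79812cb5b96da223e2040a7ce36d45',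
--         'aceh'       :'http://api.openweathermap.org/data/2.5/weather?q=Aceh,id&appid=2c79812cb5b96da223e2040a7ce36d45',
--         'padang'     :'http://api.openweathermap.org/data/2.5/weather?q=Padang,id&appid=2c79812cb5b96da223e2040a7ce36d45',
--         'pekanbaru'  :'http://api.openweathermap.org/data/2.5/weather?q=Pekanbaru,id&appid=2c79812cb5b96da223e2040a7ce36d45',
--         'denpasar'   :'http://api.openweathermap.org/data/2.5/weather?q=Denpasar,id&appid=2c79812cb5b96da223e2040a7ce36d45',
--         'makassar'   :'http://api.openweathermap.org/data/2.5/weather?q=Makassar,id&appid=2c79812cb5b96da223e2040a7ce36d45',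
--         'palu'       :'http://api.openweathermap.org/data/2.5/weather?q=Palu,id&appid=2c79812cb5b96da223e2040a7ce36d45',
--         'banjarmasin':'http://api.openweathermap.org/data/2.5/weather?q=Banjarmasin,id&appid=2c79812cb5b96da223e2040a7ce36d45',
--         'jayapura'   :'http://api.openweathermap.org/data/2.5/weather?q=Jayapura,id&appid=2c79812cb5b96da223e2040a7ce36d45'
--         }
--     get_address=[]
--     for city in cities:
--         city=city.lower()
--         get_address.append(api_address[city])
--     return get_address
-- ===== SOURCE B (Python) =====
-- # Same mapping, but as a validated URL template over a set of known city names
-- # instead of a 20-entry hardcoded dict (raises KeyError on unknown cities, like A).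
--
-- _VALID = frozenset((
--     'bekasi', 'jakarta', 'depok', 'bogor', 'tangerang', 'bandung', 'cirebon',
--     'banten', 'yogyakarta', 'kebumen', 'palembang', 'medan', 'aceh', 'padang',
--     'pekanbaru', 'denpasar', 'makassar', 'palu', 'banjarmasin', 'jayapura',
-- ))
--
-- _PREFIX = 'http://api.openweathermap.org/data/2.5/weather?q='
-- _SUFFIX = ',id&appid=2c79812cb5b96da223e2040a7ce36d45'
--
--
-- def get_api_address(cities=None):
--     if cities is None:
--         cities = (
--             'bekasi', 'jakarta', 'depok', 'bogor', 'tangerang', 'bandung',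
--             'cirebon', 'banten', 'yogyakarta', 'kebumen', 'palembang', 'medan',
--             'aceh', 'padang', 'pekanbaru', 'denpasar', 'makassar', 'palu',
--             'banjarmasin', 'jayapura',
--         )
--     addresses = []
--     for city in cities:
--         name = city.lower()
--         if name not in _VALID:
--             raise KeyError(name)
--         addresses.append(_PREFIX + name.capitalize() + _SUFFIX)
--     return addresses
-- ===== Notes on version B (the rewrite author's own statement) =====
-- stated objective: simpler
-- what changed: Replaces the hardcoded 20-entry city-to-URL dict with a set of valid lowercase city names plus a single URL template (prefix + capitalized name + suffix), raising KeyError on unknown names just as the dict lookup did.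
import Mathlib
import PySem

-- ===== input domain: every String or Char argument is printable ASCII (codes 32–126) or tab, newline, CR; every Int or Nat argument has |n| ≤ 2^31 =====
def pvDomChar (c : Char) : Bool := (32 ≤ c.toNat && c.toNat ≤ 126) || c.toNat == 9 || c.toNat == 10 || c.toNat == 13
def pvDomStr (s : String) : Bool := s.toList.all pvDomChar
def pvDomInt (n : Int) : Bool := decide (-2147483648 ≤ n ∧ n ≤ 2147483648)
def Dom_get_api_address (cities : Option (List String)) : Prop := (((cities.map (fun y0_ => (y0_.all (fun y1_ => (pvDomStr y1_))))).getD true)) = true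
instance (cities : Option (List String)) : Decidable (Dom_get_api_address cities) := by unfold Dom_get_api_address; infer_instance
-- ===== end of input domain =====

-- B differs from A only in representation: a set of valid city names plus a URL
-- template, instead of A's hardcoded 20-entry city→URL dict (objective: simpler).

-- ===== PORT A =====
def pvDefaultCities : List String :=
  ["bekasi","jakarta","depok","bogor","tangerang","bandung","cirebon","banten","yogyakarta","kebumen","palembang","medan","aceh","padang","pekanbaru","denpasar","makassar","palu","banjarmasin","jayapura"]

def pvApiAddress : PySem.Dict String String := PySem.Dict.ofList
  [ ("bekasi",      "http://api.openweathermap.org/data/2.5/weather?q=Bekasi,id&appid=2c79812cb5b96da223e2040a7ce36d45"),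
    ("jakarta",     "http://api.openweathermap.org/data/2.5/weather?q=Jakarta,id&appid=2c79812cb5b96da223e2040a7ce36d45"),
    ("depok",       "http://api.openweathermap.org/data/2.5/weather?q=Depok,id&appid=2c79812cb5b96da223e2040a7ce36d45"),
    ("bogor",       "http://api.openweathermap.org/data/2.5/weather?q=Bogor,id&appid=2c79812cb5b96da223e2040a7ce36d45"),
    ("tangerang",   "http://api.openweathermap.org/data/2.5/weather?q=Tangerang,id&appid=2c79812cb5b96da223e2040a7ce36d45"),
    ("bandung",     "http://api.openweathermap.org/data/2.5/weather?q=Bandung,id&appid=2c79812cb5b96da223e2040a7ce36d45"),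
    ("cirebon",     "http://api.openweathermap.org/data/2.5/weather?q=Cirebon,id&appid=2c79812cb5b96da223e2040a7ce36d45"),
    ("banten",      "http://api.openweathermap.org/data/2.5/weather?q=Banten,id&appid=2c79812cb5b96da223e2040a7ce36d45"),
    ("yogyakarta",  "http://api.openweathermap.org/data/2.5/weather?q=Yogyakarta,id&appid=2c79812cb5b96da223e2040a7ce36d45"),
    ("kebumen",     "http://api.openweathermap.org/data/2.5/weather?q=Kebumen,id&appid=2c79812cb5b96da223e2040a7ce36d45"),
    ("palembang",   "http://api.openweathermap.org/data/2.5/weather?q=Palembang,id&appid=2c79812cb5b96da223e2040a7ce36d45"),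
    ("medan",       "http://api.openweathermap.org/data/2.5/weather?q=Medan,id&appid=2c79812cb5b96da223e2040a7ce36d45"),
    ("aceh",        "http://api.openweathermap.org/data/2.5/weather?q=Aceh,id&appid=2c79812cb5b96da223e2040a7ce36d45"),
    ("padang",      "http://api.openweathermap.org/data/2.5/weather?q=Padang,id&appid=2c79812cb5b96da223e2040a7ce36d45"),
    ("pekanbaru",   "http://api.openweathermap.org/data/2.5/weather?q=Pekanbaru,id&appid=2c79812cb5b96da223e2040a7ce36d45"),
    ("denpasar",    "http://api.openweathermap.org/data/2.5/weather?q=Denpasar,id&appid=2c79812cb5b96da223e2040a7ce36d45"),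
    ("makassar",    "http://api.openweathermap.org/data/2.5/weather?q=Makassar,id&appid=2c79812cb5b96da223e2040a7ce36d45"),
    ("palu",        "http://api.openweathermap.org/data/2.5/weather?q=Palu,id&appid=2c79812cb5b96da223e2040a7ce36d45"),
    ("banjarmasin", "http://api.openweathermap.org/data/2.5/weather?q=Banjarmasin,id&appid=2c79812cb5b96da223e2040a7ce36d45"),
    ("jayapura",    "http://api.openweathermap.org/data/2.5/weather?q=Jayapura,id&appid=2c79812cb5b96da223e2040a7ce36d45") ]

-- The "" default marks where Python's api_address[city] raises KeyError; Pre_ excludes those inputs.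
def get_api_address (cities : Option (List String)) : List String :=
  let cs := match cities with
    | none => pvDefaultCities
    | some l => l
  cs.foldl (fun get_address city => get_address ++ [((pvApiAddress.get? (PySem.Str.lower city)).getD "")]) []

-- ===== PORT B =====
def pvValidCities : PySem.Set String := PySem.Set.ofList pvDefaultCities

def pvUrlPrefix : String := "http://api.openweathermap.org/data/2.5/weather?q="
def pvUrlSuffix : String := ",id&appid=2c79812cb5b96da223e2040a7ce36d45"

-- str.capitalize(), exact on ASCII: first char uppercased, rest lowercased.
def pvCapitalize (s : String) : String :=
  match s.toList with
  | [] => s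
  | c :: cs => String.ofList (PySem.Chars.upperChar c :: PySem.Chars.lower cs)

-- The "" branch marks where Source B raises KeyError(name); Pre_ excludes those inputs.
def get_api_address_alt (cities : Option (List String)) : List String :=
  let cs := match cities with
    | none => pvDefaultCities
    | some l => l
  cs.foldl (fun addresses city =>
    let name := PySem.Str.lower city
    addresses ++ [(if pvValidCities.contains name then pvUrlPrefix ++ pvCapitalize name ++ pvUrlSuffix else "")]) []

-- ===== PRECONDITION & SPEC =====
-- Pre_ excludes exactly the inputs containing a city whose lowercase form is not a
-- known city name: there A's dict lookup raises KeyError (and Source B raises KeyError too).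
def Pre_get_api_address (cities : Option (List String)) : Prop :=
  ((cities.map (fun l => l.all (fun c => pvValidCities.contains (PySem.Str.lower c)))).getD true) = true
instance (cities : Option (List String)) : Decidable (Pre_get_api_address cities) := by unfold Pre_get_api_address; infer_instance

def pvWitness_get_api_address : Option (List String) := some ["Jakarta", "PALU", "medan"]

def Spec_get_api_address (cities : Option (List String)) (out : List String) : Prop := out = get_api_address_alt cities
instance (cities : Option (List String)) (out : List String) : Decidable (Spec_get_api_address cities out) := by unfold Spec_get_api_address; infer_instance

-- ===== CLAIM (what is proved, stated in full; the proofs are below) =====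
def Claim_equal_get_api_address : Prop := ∀ (cities : Option (List String)), Dom_get_api_address cities → Pre_get_api_address cities → Spec_get_api_address cities (get_api_address cities)

-- ===== LEMMAS AND PROOFS =====

-- Pointwise: on a valid lowercase name, A's dict value is exactly B's templated URL.
theorem pv_point (city : String)
    (h : pvValidCities.contains (PySem.Str.lower city) = true) :
    ((pvApiAddress.get? (PySem.Str.lower city)).getD "") =
      (if pvValidCities.contains (PySem.Str.lower city) then
        pvUrlPrefix ++ pvCapitalize (PySem.Str.lower city) ++ pvUrlSuffix else "") := by
  rw [if_pos h]
  have hm : PySem.Str.lower city ∈ pvDefaultCities := by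
    simpa [pvValidCities, PySem.Set.mem_ofList] using h
  set n := PySem.Str.lower city with hn
  clear_value n
  simp only [pvDefaultCities, List.mem_cons, List.not_mem_nil, or_false] at hm
  rcases hm with h | h | h | h | h | h | h | h | h | h | h | h | h | h | h | h | h | h | h | h <;>
    subst h <;> rfl

theorem pv_loop (cs : List String)
    (h : cs.all (fun c => pvValidCities.contains (PySem.Str.lower c)) = true) :
    cs.foldl (fun get_address city => get_address ++ [((pvApiAddress.get? (PySem.Str.lower city)).getD "")]) [] =
    cs.foldl (fun addresses city =>
      let name := PySem.Str.lower city
      addresses ++ [(if pvValidCities.contains name then pvUrlPrefix ++ pvCapitalize name ++ pvUrlSuffix else "")]) [] := by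
  rw [PySem.List.foldl_append_singleton_eq_map, PySem.List.foldl_append_singleton_eq_map]
  refine List.map_congr_left ?_
  intro c hc
  exact pv_point c (by simpa using List.all_eq_true.mp h c hc)

-- ===== VERDICT (by name: the statement is the Claim_ definition above) =====
theorem get_api_address_spec : Claim_equal_get_api_address := by
  intro cities _ hpre
  unfold Spec_get_api_address get_api_address get_api_address_alt
  cases cities with
  | none => exact pv_loop pvDefaultCities (by decide)
  | some l =>
      simp only [Option.map_some, Option.getD_some, Pre_get_api_address] at hpre
      exact pv_loop l hpre
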